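-- pv_equiv track=rewrite | github.com/davinsousa/SgfTree | sgf_parsing.py | propkey
-- ===== SOURCE A (Python) =====
-- def propkey(input_string):
--
--     prop_key=""
--     flag_prop_key=0
--     n=0
--
--     while flag_prop_key==0:
--         if input_string[n].isalpha() and input_string[n].isupper():
--             prop_key=prop_key+input_string[n]
--             n=n+1
--         else:
--             if input_string[n]=="[":
--                 flag_prop_key=1
--             else:
--                 raise ValueError("Error in Key")
--
--     return prop_key,n
-- ===== SOURCE B (Python) =====
-- def propkey(input_string):
--     # Find the first index whose char breaks the uppercase-letter run (or len),
--     # then check the bracket once and slice the key out in one go.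
--     n = next((i for i, c in enumerate(input_string)
--               if not (c.isalpha() and c.isupper())), len(input_string))
--     if input_string[n] != "[":
--         raise ValueError("Error in Key")
--     return input_string[:n], n
-- ===== Notes on version B (the rewrite author's own statement) =====
-- stated objective: simpler
-- what changed: Instead of a flag-driven while loop that accumulates the key character by character, B locates the first non-uppercase-letter index with a single enumerate/next scan, checks the terminator character there once, and slices the key out; Pre_ excludes exactly the inputs where A raises (ValueError on a bad terminator, IndexError when the uppercase run consumes the whole string), where B raises identically.
import Mathlib
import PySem

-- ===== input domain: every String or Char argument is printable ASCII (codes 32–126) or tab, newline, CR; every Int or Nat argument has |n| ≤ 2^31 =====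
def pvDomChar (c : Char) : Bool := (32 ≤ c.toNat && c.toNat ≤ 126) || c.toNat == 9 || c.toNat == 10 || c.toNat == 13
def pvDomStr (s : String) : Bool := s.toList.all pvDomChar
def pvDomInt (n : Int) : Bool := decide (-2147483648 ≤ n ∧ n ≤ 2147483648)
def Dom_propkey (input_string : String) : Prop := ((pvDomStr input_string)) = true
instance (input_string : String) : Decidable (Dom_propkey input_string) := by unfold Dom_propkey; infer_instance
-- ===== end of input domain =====

-- B replaces A's flag-driven accumulating while loop by: find the first non-uppercase-letter
-- index, check '[' there once, slice the key (objective: simpler). Return values only; on the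
-- inputs Pre_ excludes both Pythons raise (ValueError / IndexError) identically.

-- shared predicate: Python's c.isalpha() and c.isupper() on one char (exact on ASCII domain)
def pvKeep (c : Char) : Bool := PySem.Chars.isalpha c && PySem.Chars.isupper c

-- ===== PORT A =====
-- the while loop: position n, accumulator prop_key; none = Python raises (IndexError / ValueError)
def pvLoopA : List Char → List Char → Nat → Option (List Char × Nat)
  | [], _, _ => none                    -- input_string[n] raises IndexError
  | c :: rest, acc, n =>
    if pvKeep c then pvLoopA rest (acc ++ [c]) (n + 1)
    else if c = '[' then some (acc, n)  -- flag_prop_key = 1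
    else none                           -- raise ValueError("Error in Key")

def propkey (input_string : String) : String × Int :=
  match pvLoopA input_string.toList [] 0 with
  | some (k, n) => (String.ofList k, (n : Int))
  | none => ("", 0)                     -- unreachable under Pre_propkey

-- ===== PORT B =====
def propkey_alt (input_string : String) : String × Int :=
  let l := input_string.toList
  let n := (l.findIdx? (fun c => !(pvKeep c))).getD l.length   -- next((i for i,c ...), len)
  match l[n]? with                                              -- input_string[n] (n ≥ 0 always)
  | some '[' => (String.ofList (l.take n), (n : Int))               -- input_string[:n], n
  | _ => ("", 0)                                                -- raise / IndexError: excluded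

-- ===== PRECONDITION & SPEC =====
-- exactly the inputs where A returns: the char right after the maximal uppercase-letter prefix
-- exists and is '[' (otherwise A raises IndexError or ValueError)
def Pre_propkey (input_string : String) : Prop :=
  (input_string.toList)[(input_string.toList.takeWhile pvKeep).length]? = some '['
instance (input_string : String) : Decidable (Pre_propkey input_string) := by
  unfold Pre_propkey; infer_instance

def pvWitness_propkey : String := "AB[x]"

def Spec_propkey (input_string : String) (out : String × Int) : Prop := out = propkey_alt input_string
instance (input_string : String) (out : String × Int) : Decidable (Spec_propkey input_string out) := by unfold Spec_propkey; infer_instance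

-- ===== CLAIM (what is proved, stated in full; the proofs are below) =====
def Claim_equal_propkey : Prop := ∀ (input_string : String), Dom_propkey input_string → Pre_propkey input_string → Spec_propkey input_string (propkey input_string)

-- ===== LEMMAS AND PROOFS =====

-- B's scan-for-first-failure index equals the length of the takeWhile prefix
lemma findIdx?_getD_eq_takeWhile_length (p : Char → Bool) (l : List Char) :
    (l.findIdx? (fun c => !(p c))).getD l.length = (l.takeWhile p).length := by
  induction l with
  | nil => simp
  | cons c rest ih =>
    by_cases h : p c = true
    · simp [List.findIdx?_cons, h, Option.getD_map] at ih ⊢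
      cases hf : rest.findIdx? (fun c => !(p c)) <;> simp [hf] at ih ⊢ <;> omega
    · simp [List.findIdx?_cons, h]

-- characterisation of A's loop by the takeWhile prefix
lemma pvLoopA_eq (l acc : List Char) (n : Nat) :
    pvLoopA l acc n =
      if l[(l.takeWhile pvKeep).length]? = some '[' then
        some (acc ++ l.takeWhile pvKeep, n + (l.takeWhile pvKeep).length)
      else none := by
  induction l generalizing acc n with
  | nil => simp [pvLoopA]
  | cons c rest ih =>
    by_cases h : pvKeep c = true
    · simp [pvLoopA, h, ih]
      split_ifs with hb
      · simp; omega
      · rfl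
    · simp only [pvLoopA, h, List.takeWhile_cons]
      by_cases hc : c = '['
      · simp [hc]
      · simp [hc]

-- take (length of the takeWhile prefix) recovers the takeWhile prefix
lemma take_length_takeWhile (p : Char → Bool) (l : List Char) :
    l.take (l.takeWhile p).length = l.takeWhile p := by
  induction l with
  | nil => simp
  | cons c rest ih =>
    by_cases h : p c = true <;> simp [List.takeWhile_cons, h, ih]

-- ===== VERDICT (by name: the statement is the Claim_ definition above) =====
theorem propkey_spec : Claim_equal_propkey := by
  intro s _ hpre
  unfold Spec_propkey propkey propkey_alt
  have h : (s.toList)[(s.toList.takeWhile pvKeep).length]? = some '[' := hpre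
  simp only [pvLoopA_eq, findIdx?_getD_eq_takeWhile_length, h, if_pos,
    take_length_takeWhile, List.nil_append, Nat.zero_add]
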